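-- pv_equiv track=rewrite | github.com/proformatique/algo | CBS/CB2018/magicSquare.py | produitMagique
-- ===== SOURCE A (Python) =====
-- def reduireCMagique(cm) -> list:
--     '''Retourne une copie de cm après réduction.
--     Données
--     ------
--         cm : list, carré magique d'ordre M.
--     Sortie
--     ------
--         cm_1 : list, copie réduite de cm.
--     '''
--     N = len(cm)
--     cm_1 = []
--     for i in range(N):
--         ligne = []
--         for j in range(N):
--             ligne += [cm[i][j] - 1]
--         cm_1 += [ligne]
--     return cm_1
--
-- def divisionMagique(i, j, M) -> tuple:
--     '''Retourne un tuple r, c.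
--     Données
--     -------
--         M : int ordre du premier carré magique
--         i : int, indice de ligne d'une case dans le carrée d'ordre N * M.
--         j : int, indice de colonne d'une case dans le carrée d'ordre N * M.
--     Sortie
--     ------
--         r : int, premier indice du sous-carré d'ordre N dans le carré final.
--         c : int, deuxième indice du sous-carré d'ordre N dans le carré final.
--     '''
--     r = i // M
--     c = j // M
--     return r, c
--
-- def produitMagique(cm1, cm2) -> list:
--     '''Retourne le produit de cm1 et cm2.
--     Données
--     ------
--         cm1 : list, carré magique d'ordre M.
--         cm2 : list, carré magique d'ordre N.
--     Sortie
--     ------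
--         produitMg : list, produit de cm1 et cm2.
--     '''
--     M = len(cm1)
--     N = len(cm2)
--     MxN = M * N
--     cmr = reduireCMagique(cm2)
--     produitMg = []
--     for i in range(MxN):
--         ligne = []
--         for j in range(MxN):
--             r, c = divisionMagique(i, j, M)
--             ligne += [M ** 2  * cmr[r][c]]
--         produitMg += [ligne]
--     return produitMg
-- ===== SOURCE B (Python) =====
-- def produitMagique(cm1, cm2):
--     '''Retourne le produit de cm1 et cm2 (tensor product of magic squares).'''
--     M = len(cm1)
--     N = len(cm2)
--     # small N x N table of the scaled, reduced values of cm2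
--     V = [[M * M * (cm2[r][c] - 1) for c in range(N)] for r in range(N)]
--     # block expansion: each small cell becomes an M x M block
--     produitMg = []
--     for r in range(N):
--         big_row = []
--         for c in range(N):
--             big_row += [V[r][c]] * M
--         for _ in range(M):
--             produitMg += [list(big_row)]
--     return produitMg
-- ===== Notes on version B (the rewrite author's own statement) =====
-- stated objective: simpler
-- what changed: Instead of a flat (M*N)x(M*N) per-cell loop computing r=i//M, c=j//M for every cell, B builds the small NxN scaled table once and tiles it by block expansion (each small cell repeated M times per row, each big row repeated M times), with no per-cell division.
import Mathlib
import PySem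

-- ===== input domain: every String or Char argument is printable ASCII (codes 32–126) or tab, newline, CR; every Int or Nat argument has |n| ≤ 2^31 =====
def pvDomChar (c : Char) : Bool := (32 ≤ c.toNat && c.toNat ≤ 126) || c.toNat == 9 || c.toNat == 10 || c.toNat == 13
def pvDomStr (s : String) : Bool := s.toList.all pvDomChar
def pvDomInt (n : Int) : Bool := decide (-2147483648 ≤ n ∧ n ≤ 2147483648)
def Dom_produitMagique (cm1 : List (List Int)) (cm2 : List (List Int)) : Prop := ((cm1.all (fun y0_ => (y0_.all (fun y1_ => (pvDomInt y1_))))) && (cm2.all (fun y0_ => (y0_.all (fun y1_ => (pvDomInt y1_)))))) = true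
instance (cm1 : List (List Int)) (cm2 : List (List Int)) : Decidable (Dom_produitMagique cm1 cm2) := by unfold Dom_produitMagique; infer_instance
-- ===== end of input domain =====

-- B replaces A's flat per-cell loop with i//M,j//M divisions by: build the small N×N
-- scaled table once, then tile it by block expansion (objective: simpler; same cost).

-- ===== PORT A =====
def reduireCMagique (cm : List (List Int)) : List (List Int) :=
  let N := cm.length
  (PySem.List.pyRange 0 (N : Int)).foldl (fun cm_1 i =>
    cm_1 ++ [(PySem.List.pyRange 0 (N : Int)).foldl (fun ligne j =>
      ligne ++ [PySem.List.pyGetD (PySem.List.pyGetD cm i []) j 0 - 1]) []]) []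

def divisionMagique (i j M : Int) : Int × Int :=
  (PySem.Int.floordiv i M, PySem.Int.floordiv j M)

def produitMagique (cm1 : List (List Int)) (cm2 : List (List Int)) : List (List Int) :=
  let M := cm1.length
  let N := cm2.length
  let MxN := M * N
  let cmr := reduireCMagique cm2
  (PySem.List.pyRange 0 (MxN : Int)).foldl (fun produitMg i =>
    produitMg ++ [(PySem.List.pyRange 0 (MxN : Int)).foldl (fun ligne j =>
      let rc := divisionMagique i j (M : Int)
      ligne ++ [((M : Int)) ^ 2 * PySem.List.pyGetD (PySem.List.pyGetD cmr rc.1 []) rc.2 0]) []]) []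

-- ===== PORT B =====
def produitMagique_alt (cm1 : List (List Int)) (cm2 : List (List Int)) : List (List Int) :=
  let M := cm1.length
  let N := cm2.length
  let V := (PySem.List.pyRange 0 (N : Int)).map (fun r =>
    (PySem.List.pyRange 0 (N : Int)).map (fun c =>
      (M : Int) * (M : Int) * (PySem.List.pyGetD (PySem.List.pyGetD cm2 r []) c 0 - 1)))
  (PySem.List.pyRange 0 (N : Int)).foldl (fun out r =>
    let bigRow := (PySem.List.pyRange 0 (N : Int)).foldl (fun big c =>
      big ++ List.replicate M (PySem.List.pyGetD (PySem.List.pyGetD V r []) c 0)) []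
    out ++ List.replicate M bigRow) []

-- ===== PRECONDITION & SPEC =====
-- Pre_: exactly where the Python A returns normally — every row of cm2 must have at
-- least N = len(cm2) entries, else A raises IndexError in reduireCMagique.
def Pre_produitMagique (cm1 : List (List Int)) (cm2 : List (List Int)) : Prop :=
  ∀ row ∈ cm2, cm2.length ≤ row.length
instance (cm1 : List (List Int)) (cm2 : List (List Int)) : Decidable (Pre_produitMagique cm1 cm2) := by unfold Pre_produitMagique; infer_instance

def pvWitness_produitMagique : List (List Int) × List (List Int) := ([[1]], [[2, 3], [4, 5]])

def Spec_produitMagique (cm1 : List (List Int)) (cm2 : List (List Int)) (out : List (List Int)) : Prop := out = produitMagique_alt cm1 cm2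
instance (cm1 : List (List Int)) (cm2 : List (List Int)) (out : List (List Int)) : Decidable (Spec_produitMagique cm1 cm2 out) := by unfold Spec_produitMagique; infer_instance

-- ===== CLAIM (what is proved, stated in full; the proofs are below) =====
def Claim_equal_produitMagique : Prop := ∀ (cm1 : List (List Int)) (cm2 : List (List Int)), Dom_produitMagique cm1 cm2 → Pre_produitMagique cm1 cm2 → Spec_produitMagique cm1 cm2 (produitMagique cm1 cm2)

-- ===== LEMMAS AND PROOFS =====

-- tiling: a length-M*N pass reading g (i / M) is N blocks of M repeated values
theorem pv_tile {α : Type} (M N : Nat) (g : Nat → α) :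
    (List.range (M * N)).map (fun i => g (i / M)) =
      (List.range N).flatMap (fun r => List.replicate M (g r)) := by
  induction N with
  | zero => simp
  | succ n ih =>
    rw [Nat.mul_succ, List.range_add, List.map_append, ih, List.range_succ,
      List.flatMap_append]
    congr 1
    simp only [List.flatMap_cons, List.flatMap_nil, List.append_nil, List.map_map]
    rcases Nat.eq_zero_or_pos M with hM | hM
    · subst hM; simp
    · have h : ∀ k ∈ List.range M, ((fun i => g (i / M)) ∘ fun x => M * n + x) k = g n := by
        intro k hk
        simp only [List.mem_range] at hk
        simp only [Function.comp_apply]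
        rw [Nat.mul_add_div hM, Nat.div_eq_of_lt hk, Nat.add_zero]
      rw [List.map_congr_left h, List.map_const', List.length_range]

theorem reduire_eq (cm : List (List Int)) :
    reduireCMagique cm =
      (List.range cm.length).map (fun i =>
        (List.range cm.length).map (fun j => (cm.getD i []).getD j 0 - 1)) := by
  simp only [reduireCMagique, PySem.List.pyRange_zero_nat, List.foldl_map,
    PySem.List.pyGetD_natCast]
  rw [PySem.List.foldl_append_singleton_eq_map, List.nil_append]
  apply List.map_congr_left
  intro i _
  rw [PySem.List.foldl_append_singleton_eq_map, List.nil_append]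

theorem A_closed (cm1 cm2 : List (List Int)) :
    produitMagique cm1 cm2 =
      (List.range (cm1.length * cm2.length)).map (fun i =>
        (List.range (cm1.length * cm2.length)).map (fun j =>
          (cm1.length : Int) ^ 2 * ((cm2.getD (i / cm1.length) []).getD (j / cm1.length) 0 - 1))) := by
  set M := cm1.length
  set N := cm2.length
  simp only [produitMagique, reduire_eq, divisionMagique, PySem.List.pyRange_zero_nat,
    List.foldl_map, PySem.List.foldl_append_singleton_eq_map, PySem.List.pyGetD_natCast,
    PySem.Int.floordiv_natCast, List.nil_append]
  apply List.map_congr_left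
  intro i hi
  rw [List.mem_range] at hi
  have hM : 0 < M := by
    rcases Nat.eq_zero_or_pos M with h | h
    · rw [show cm1.length = 0 from h, Nat.zero_mul] at hi; omega
    · exact h
  have hiN : i / M < N := Nat.div_lt_of_lt_mul (by omega)
  apply List.map_congr_left
  intro j hj
  rw [List.mem_range] at hj
  have hjN : j / M < N := Nat.div_lt_of_lt_mul (by omega)
  rw [PySem.List.getD_map_range _ _ _ _ hiN]
  rw [PySem.List.getD_map_range _ _ _ _ hjN]

theorem B_closed (cm1 cm2 : List (List Int)) :
    produitMagique_alt cm1 cm2 =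
      (List.range cm2.length).flatMap (fun r => List.replicate cm1.length
        ((List.range cm2.length).flatMap (fun c => List.replicate cm1.length
          ((cm1.length : Int) * cm1.length * ((cm2.getD r []).getD c 0 - 1))))) := by
  simp only [produitMagique_alt, PySem.List.pyRange_zero_nat, List.foldl_map,
    PySem.List.foldl_append_eq_flatMap, PySem.List.pyGetD_natCast, List.nil_append]
  apply List.flatMap_congr
  intro r hr
  rw [List.mem_range] at hr
  congr 1
  apply List.flatMap_congr
  intro c hc
  rw [List.mem_range] at hc
  congr 1
  rw [List.map_map, PySem.List.getD_map_range _ _ _ _ hr]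
  simp only [Function.comp_apply, List.map_map]
  rw [PySem.List.getD_map_range _ _ _ _ hc]
  simp only [Function.comp_apply, PySem.List.pyGetD_natCast]

theorem pv_tile2 (M N : Nat) (v : Nat → Nat → Int) :
    (List.range (M * N)).map (fun i => (List.range (M * N)).map (fun j => v (i / M) (j / M))) =
      (List.range N).flatMap (fun r => List.replicate M
        ((List.range N).flatMap (fun c => List.replicate M (v r c)))) := by
  have h1 : (List.range (M * N)).map (fun i => (List.range (M * N)).map (fun j => v (i / M) (j / M))) =
      (List.range N).flatMap (fun r => List.replicate M
        ((List.range (M * N)).map (fun j => v r (j / M)))) :=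
    pv_tile M N (fun r => (List.range (M * N)).map (fun j => v r (j / M)))
  rw [h1]
  apply List.flatMap_congr
  intro r _
  congr 1
  exact pv_tile M N (fun c => v r c)

-- ===== VERDICT (by name: the statement is the Claim_ definition above) =====
theorem produitMagique_spec : Claim_equal_produitMagique := by
  intro cm1 cm2 _hDom _hPre
  unfold Spec_produitMagique
  rw [A_closed, B_closed]
  have h := pv_tile2 cm1.length cm2.length
    (fun r c => (cm1.length : Int) ^ 2 * ((cm2.getD r []).getD c 0 - 1))
  refine h.trans ?_
  apply List.flatMap_congr
  intro r _
  congr 1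
  apply List.flatMap_congr
  intro c _
  congr 1
  ring
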